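-- pv_equiv track=rewrite | github.com/SCU-SCST-SAST-MR/Learning-Materials | Python程序设计/2016-2/2016-02(by XuWeiwei).py | count_v
-- ===== SOURCE A (Python) =====
-- def count_v(vehicle_lst, vehicle_set):
--     dic={}
--     for i in vehicle_set:
--         if dic.get(i,0)==0:
--             count = 0
--             for j in vehicle_lst:
--                 if j.startswith(i):
--                     count+=1
--             dic[i]=count
--     return dic
-- ===== SOURCE B (Python) =====
-- def count_v(vehicle_lst, vehicle_set):
--     # inverted lookup: instead of a startswith scan per set element, hash the
--     # prefix set once and, for each list string, look up each of ITS prefixes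
--     dic = {p: 0 for p in vehicle_set}
--     for j in vehicle_lst:
--         for t in range(len(j) + 1):
--             p = j[:t]
--             if p in dic:
--                 dic[p] += 1
--     return dic
-- ===== Notes on version B (the rewrite author's own statement) =====
-- stated objective: faster
-- what changed: A scans the whole list with startswith once per set element; B builds a hash map of the prefixes once and makes one pass over the list, enumerating each string's own prefixes and looking each up in the map, so no pairwise startswith scan remains.
import Mathlib
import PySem

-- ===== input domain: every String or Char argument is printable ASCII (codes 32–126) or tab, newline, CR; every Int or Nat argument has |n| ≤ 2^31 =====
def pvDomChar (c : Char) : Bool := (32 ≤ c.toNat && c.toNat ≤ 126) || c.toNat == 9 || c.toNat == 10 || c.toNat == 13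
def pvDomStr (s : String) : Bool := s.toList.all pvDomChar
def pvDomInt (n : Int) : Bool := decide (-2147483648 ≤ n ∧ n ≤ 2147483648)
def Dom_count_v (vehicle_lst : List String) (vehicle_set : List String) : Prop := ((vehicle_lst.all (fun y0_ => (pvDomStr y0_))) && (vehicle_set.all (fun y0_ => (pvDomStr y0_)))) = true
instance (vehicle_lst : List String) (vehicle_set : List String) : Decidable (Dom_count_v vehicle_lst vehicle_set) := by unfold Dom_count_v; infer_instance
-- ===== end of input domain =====

-- B replaces A's per-prefix startswith scan of the list by one hash map of the prefixes and a
-- single pass over the list that enumerates each string's own prefixes and looks them up (faster).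


-- ===== PORT A =====
def count_v (vehicle_lst : List String) (vehicle_set : List String) : List (String × Int) :=
  (vehicle_set.foldl (fun dic i =>
      if dic.getD i 0 == 0 then
        dic.insert i (vehicle_lst.foldl (fun count j =>
          if PySem.Str.startswith j i then count + 1 else count) 0)
      else dic)
    (PySem.Dict.empty : PySem.Dict String Int)).items

-- ===== PORT B =====
def count_v_alt (vehicle_lst : List String) (vehicle_set : List String) : List (String × Int) :=
  let dic0 : PySem.Dict String Int :=
    vehicle_set.foldl (fun d p => d.insert p 0) PySem.Dict.empty
  (vehicle_lst.foldl (fun dic j =>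
      (PySem.List.pyRange 0 (PySem.Str.len j + 1) 1).foldl (fun d t =>
        let p := PySem.Str.slice j none (some t)
        if d.contains p then d.modify p 0 (· + 1) else d) dic)
    dic0).items

-- ===== PRECONDITION & SPEC =====
def Spec_count_v (vehicle_lst : List String) (vehicle_set : List String) (out : List (String × Int)) : Prop := out = count_v_alt vehicle_lst vehicle_set
instance (vehicle_lst : List String) (vehicle_set : List String) (out : List (String × Int)) : Decidable (Spec_count_v vehicle_lst vehicle_set out) := by unfold Spec_count_v; infer_instance

-- ===== CLAIM (what is proved, stated in full; the proofs are below) =====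
def Claim_equal_count_v : Prop := ∀ (vehicle_lst : List String) (vehicle_set : List String), Dom_count_v vehicle_lst vehicle_set → Spec_count_v vehicle_lst vehicle_set (count_v vehicle_lst vehicle_set)

-- ===== LEMMAS AND PROOFS =====

-- the common count of list elements starting with prefix p
def pvCnt (lst : List String) (p : String) : Int :=
  (lst.countP (fun j => PySem.Str.startswith j p) : Int)

-- A's loop: keys accumulate as a Python set, every present key holds its count
theorem pvA_loop (lst : List String) : ∀ (s : List String) (d : PySem.Dict String Int),
    d.keys.Nodup → (∀ k, d.contains k = true → d.getD k 0 = pvCnt lst k) →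
    (s.foldl (fun dic i =>
        if dic.getD i 0 == 0 then
          dic.insert i (lst.foldl (fun count j =>
            if PySem.Str.startswith j i then count + 1 else count) 0)
        else dic) d).keys = PySem.Set.update d.keys s ∧
    (s.foldl (fun dic i =>
        if dic.getD i 0 == 0 then
          dic.insert i (lst.foldl (fun count j =>
            if PySem.Str.startswith j i then count + 1 else count) 0)
        else dic) d).keys.Nodup ∧
    (∀ k, (s.foldl (fun dic i =>
        if dic.getD i 0 == 0 then
          dic.insert i (lst.foldl (fun count j =>
            if PySem.Str.startswith j i then count + 1 else count) 0)
        else dic) d).contains k = true →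
      (s.foldl (fun dic i =>
        if dic.getD i 0 == 0 then
          dic.insert i (lst.foldl (fun count j =>
            if PySem.Str.startswith j i then count + 1 else count) 0)
        else dic) d).getD k 0 = pvCnt lst k) := by
  intro s
  induction s with
  | nil => intro d hnd hval; exact ⟨rfl, hnd, hval⟩
  | cons i rest ih =>
    intro d hnd hval
    have hcntfold : lst.foldl (fun count j =>
        if PySem.Str.startswith j i then count + 1 else count) 0 = pvCnt lst i := by
      rw [PySem.List.foldl_count_if]; simp [pvCnt]
    by_cases hz : d.getD i 0 = 0
    · -- insert branch
      have hguard : (d.getD i 0 == 0) = true := by simp [hz]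
      have hstep : (if d.getD i 0 == 0 then d.insert i (lst.foldl (fun count j =>
            if PySem.Str.startswith j i then count + 1 else count) 0) else d)
          = d.insert i (pvCnt lst i) := by rw [hguard, hcntfold]; simp
      have hnd' : (d.insert i (pvCnt lst i)).keys.Nodup := PySem.Dict.nodup_keys_insert d i _ hnd
      have hval' : ∀ k, (d.insert i (pvCnt lst i)).contains k = true →
          (d.insert i (pvCnt lst i)).getD k 0 = pvCnt lst k := by
        intro k hk
        rw [PySem.Dict.getD_insert]
        by_cases hki : k = i
        · simp [hki]
        · simp only [if_neg hki]
          apply hval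
          rw [PySem.Dict.contains_insert] at hk
          simpa [hki] using hk
      have hkeys' : (d.insert i (pvCnt lst i)).keys = PySem.Set.add d.keys i := by
        by_cases hc : d.contains i = true
        · have hm : i ∈ d.keys := (PySem.Dict.contains_iff_mem_keys d i).mp hc
          rw [PySem.Dict.keys_insert_of_contains d _ hc]
          simp [PySem.Set.add, hm]
        · have hm : i ∉ d.keys := fun h => hc ((PySem.Dict.contains_iff_mem_keys d i).mpr h)
          rw [PySem.Dict.keys_insert_of_not_contains d _ (by simpa using hc)]
          simp [PySem.Set.add, hm]
      simp only [List.foldl_cons, hstep]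
      obtain ⟨h1, h2, h3⟩ := ih (d.insert i (pvCnt lst i)) hnd' hval'
      refine ⟨?_, h2, h3⟩
      rw [h1, hkeys']; rfl
    · -- skip branch: key i already present (with nonzero value)
      have hguard : (d.getD i 0 == 0) = false := by simp [hz]
      have hstep : (if d.getD i 0 == 0 then d.insert i (lst.foldl (fun count j =>
            if PySem.Str.startswith j i then count + 1 else count) 0) else d) = d := by
        rw [hguard]; simp
      have hc : d.contains i = true := by
        by_contra hc
        exact hz (PySem.Dict.getD_of_not_contains d 0 (by simpa using hc))
      have hm : i ∈ d.keys := (PySem.Dict.contains_iff_mem_keys d i).mp hc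
      simp only [List.foldl_cons, hstep]
      obtain ⟨h1, h2, h3⟩ := ih d hnd hval
      refine ⟨?_, h2, h3⟩
      rw [h1]
      show _ = PySem.Set.update (PySem.Set.add d.keys i) rest
      simp [PySem.Set.add, hm]

-- B's first loop ({p: 0 for p in s}): keys accumulate as a Python set, every value is 0
theorem pvB0_loop : ∀ (s : List String) (d : PySem.Dict String Int),
    d.keys.Nodup → (∀ k, d.getD k 0 = 0) →
    (s.foldl (fun d p => d.insert p 0) d).keys = PySem.Set.update d.keys s ∧
    (s.foldl (fun d p => d.insert p 0) d).keys.Nodup ∧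
    (∀ k, (s.foldl (fun d p => d.insert p 0) d).getD k 0 = 0) := by
  intro s
  induction s with
  | nil => intro d hnd hval; exact ⟨rfl, hnd, hval⟩
  | cons p rest ih =>
    intro d hnd hval
    have hnd' : (d.insert p 0).keys.Nodup := PySem.Dict.nodup_keys_insert d p 0 hnd
    have hval' : ∀ k, (d.insert p 0).getD k 0 = 0 := by
      intro k; rw [PySem.Dict.getD_insert]; split <;> simp [hval]
    have hkeys' : (d.insert p 0).keys = PySem.Set.add d.keys p := by
      by_cases hc : d.contains p = true
      · have hm : p ∈ d.keys := (PySem.Dict.contains_iff_mem_keys d p).mp hc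
        rw [PySem.Dict.keys_insert_of_contains d _ hc]
        simp [PySem.Set.add, hm]
      · have hm : p ∉ d.keys := fun h => hc ((PySem.Dict.contains_iff_mem_keys d p).mpr h)
        rw [PySem.Dict.keys_insert_of_not_contains d _ (by simpa using hc)]
        simp [PySem.Set.add, hm]
    simp only [List.foldl_cons]
    obtain ⟨h1, h2, h3⟩ := ih (d.insert p 0) hnd' hval'
    refine ⟨?_, h2, h3⟩
    rw [h1, hkeys']; rfl

-- guarded conditional increments over ANY list of keys: keys unchanged, each present
-- key increments by its multiplicity in the list
theorem pvIncr_loop : ∀ (P : List String) (d : PySem.Dict String Int),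
    (P.foldl (fun d p => if d.contains p then d.modify p 0 (· + 1) else d) d).keys = d.keys ∧
    (∀ k, (P.foldl (fun d p => if d.contains p then d.modify p 0 (· + 1) else d) d).getD k 0
      = d.getD k 0 + (if d.contains k then (P.count k : Int) else 0)) := by
  intro P
  induction P with
  | nil => intro d; refine ⟨rfl, fun k => by simp⟩
  | cons p rest ih =>
    intro d
    set d1 := if d.contains p then d.modify p 0 (· + 1) else d with hd1
    have hkeys1 : d1.keys = d.keys := by
      rw [hd1]; split
      · next hc => rw [PySem.Dict.keys_modify, PySem.Dict.keys_insert_of_contains d _ hc]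
      · rfl
    have hcont1 : ∀ k, d1.contains k = d.contains k := by
      intro k; rw [hd1]; split
      · next hc =>
        rw [PySem.Dict.contains_modify]
        by_cases hk : k = p
        · simp [hk, hc]
        · simp [hk]
      · rfl
    have hget1 : ∀ k, d1.getD k 0 = d.getD k 0 + (if k = p ∧ d.contains p then 1 else 0) := by
      intro k
      rw [hd1]
      by_cases hc : d.contains p = true
      · rw [if_pos hc, PySem.Dict.getD_modify]
        by_cases hk : k = p
        · subst hk; simp [hc]
        · simp [hk]
      · rw [if_neg hc]
        simp [hc]
    obtain ⟨h1, h2⟩ := ih d1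
    simp only [List.foldl_cons, ← hd1]
    refine ⟨h1.trans hkeys1, ?_⟩
    intro k
    rw [h2 k, hget1 k, hcont1 k, List.count_cons]
    by_cases hc : d.contains k = true
    · by_cases hk : k = p
      · subst hk; simp [hc]; ring
      · have : ¬ (k = p ∧ d.contains p = true) := fun h => hk h.1
        simp only [hc, if_true, if_neg this, beq_iff_eq]
        rw [if_neg (fun h => hk h.symm)]
        push_cast; ring
    · have hc' : d.contains k = false := by simpa using hc
      have : ¬ (k = p ∧ d.contains p = true) := by
        rintro ⟨rfl, h⟩; rw [hc'] at h; exact Bool.false_ne_true h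
      simp [hc', this]

-- the prefix enumeration of j, as a plain list of strings
def pvPrefs (j : String) : List String :=
  (List.range (j.toList.length + 1)).map (fun t => String.ofList (j.toList.take t))

-- B's inner loop over t ∈ range(len(j)+1) IS the guarded-increment loop over pvPrefs j
theorem pvInner_eq (j : String) (d : PySem.Dict String Int) :
    (PySem.List.pyRange 0 (PySem.Str.len j + 1) 1).foldl (fun d t =>
        let p := PySem.Str.slice j none (some t)
        if d.contains p then d.modify p 0 (· + 1) else d) d
    = (pvPrefs j).foldl (fun d p => if d.contains p then d.modify p 0 (· + 1) else d) d := by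
  have hlen : PySem.Str.len j + 1 = ((j.toList.length + 1 : Nat) : Int) := by
    simp [PySem.Str.len_eq]
  rw [hlen, PySem.List.pyRange_zero_natCast]
  unfold pvPrefs
  rw [List.foldl_map, List.foldl_map]
  refine PySem.List.foldl_congr_mem _ _ _ _ ?_
  intro acc t _
  have hslice : PySem.Str.slice j none (some ((t : Nat) : Int)) = String.ofList (j.toList.take t) := by
    apply String.toList_inj.mp
    rw [PySem.Str.toList_slice, PySem.Chars.slice_eq_listSlice, PySem.List.slice_to_natCast,
      String.toList_ofList]
  simp only [hslice]

-- multiplicity of k among the prefixes of j is the startswith indicator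
theorem pvPrefs_count (j k : String) :
    ((pvPrefs j).count k : Int) = (if PySem.Str.startswith j k then 1 else 0) := by
  have hcnt : (pvPrefs j).count k
      = (if PySem.Str.startswith j k then 1 else 0 : Nat) := by
    unfold pvPrefs
    rw [List.count_eq_countP, List.countP_map]
    by_cases hpre : k.toList <+: j.toList
    · have hsw : PySem.Str.startswith j k = true := by
        simp only [PySem.Str.startswith_eq, PySem.Chars.startswith_iff]; exact hpre
      have htake : k.toList = j.toList.take k.toList.length := List.prefix_iff_eq_take.mp hpre
      have hlen : k.toList.length ≤ j.toList.length := hpre.length_le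
      rw [List.countP_congr (q := fun t => t == k.toList.length) ?_]
      · rw [← List.count_eq_countP, List.count_range, if_pos (by omega), if_pos hsw]
      · intro t ht
        simp only [List.mem_range] at ht
        simp only [Function.comp, beq_iff_eq]
        constructor
        · intro h
          have h' : j.toList.take t = k.toList := by
            rw [← h, String.toList_ofList]
          have : (j.toList.take t).length = k.toList.length := by rw [h']
          rw [List.length_take, Nat.min_eq_left (by omega)] at this
          exact this
        · intro h
          rw [h, ← htake, String.ofList_toList]
    · have hsw : PySem.Str.startswith j k = false := by
        rw [PySem.Str.startswith_eq]
        exact Bool.eq_false_iff.mpr (fun h => hpre ((PySem.Chars.startswith_iff _ _).mp h))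
      rw [if_neg (by rw [hsw]; simp), List.countP_eq_zero.mpr ?_]
      intro t _
      simp only [Function.comp, beq_iff_eq]
      intro h
      apply hpre
      have h' : j.toList.take t = k.toList := by rw [← h, String.toList_ofList]
      rw [← h']
      exact List.take_prefix t j.toList
  rw [hcnt]
  split <;> simp

-- B's outer loop: every key accumulates its startswith-count over the list
theorem pvB_outer : ∀ (lst : List String) (d : PySem.Dict String Int),
    (lst.foldl (fun dic j =>
        (PySem.List.pyRange 0 (PySem.Str.len j + 1) 1).foldl (fun d t =>
          let p := PySem.Str.slice j none (some t)
          if d.contains p then d.modify p 0 (· + 1) else d) dic) d).keys = d.keys ∧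
    (∀ k, (lst.foldl (fun dic j =>
        (PySem.List.pyRange 0 (PySem.Str.len j + 1) 1).foldl (fun d t =>
          let p := PySem.Str.slice j none (some t)
          if d.contains p then d.modify p 0 (· + 1) else d) dic) d).getD k 0
      = d.getD k 0 + (if d.contains k then pvCnt lst k else 0)) := by
  intro lst
  induction lst with
  | nil => intro d; refine ⟨rfl, fun k => by simp [pvCnt]⟩
  | cons j rest ih =>
    intro d
    obtain ⟨hk1, hv1⟩ := pvIncr_loop (pvPrefs j) d
    obtain ⟨hk2, hv2⟩ := ih ((pvPrefs j).foldl (fun d p => if d.contains p then d.modify p 0 (· + 1) else d) d)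
    constructor
    · simp only [List.foldl_cons]
      rw [pvInner_eq]
      exact hk2.trans hk1
    intro k
    simp only [List.foldl_cons]
    rw [pvInner_eq]
    rw [hv2 k, hv1 k]
    have hcont : ((pvPrefs j).foldl (fun d p => if d.contains p then d.modify p 0 (· + 1) else d) d).contains k
        = d.contains k := by
      rw [PySem.Dict.contains_eq_decide_mem_keys, PySem.Dict.contains_eq_decide_mem_keys, hk1]
    rw [hcont]
    by_cases hc : d.contains k = true
    · rw [if_pos hc, if_pos hc, if_pos hc]
      have hcons : pvCnt (j :: rest) k = (if PySem.Str.startswith j k then 1 else 0) + pvCnt rest k := by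
        simp only [pvCnt, List.countP_cons]
        split <;> push_cast <;> ring
      rw [hcons, ← pvPrefs_count j k]; ring
    · have hc' : d.contains k = false := by simpa using hc
      simp [hc']

-- a dict with nodup keys is its keys paired with their values
theorem pv_items_eq_keys_map (d : PySem.Dict String Int) (h : d.keys.Nodup) :
    d.items = d.keys.map (fun k => (k, d.getD k 0)) :=
  PySem.Dict.items_eq_map_keys d h 0

-- ===== VERDICT (by name: the statement is the Claim_ definition above) =====
theorem count_v_spec : Claim_equal_count_v := by
  intro lst s _
  show count_v lst s = count_v_alt lst s
  obtain ⟨hAk, hAnd, hAv⟩ := pvA_loop lst s PySem.Dict.empty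
    (by simp [PySem.Dict.keys_empty]) (by intro k hk; simp [PySem.Dict.contains_empty] at hk)
  obtain ⟨hB0k, hB0nd, hB0v⟩ := pvB0_loop s PySem.Dict.empty
    (by simp [PySem.Dict.keys_empty]) (by intro k; simp [PySem.Dict.getD_empty])
  set dB0 := s.foldl (fun d p => d.insert p 0) (PySem.Dict.empty : PySem.Dict String Int) with hdB0
  obtain ⟨hBk, hBv⟩ := pvB_outer lst dB0
  set dA := s.foldl (fun dic i =>
      if dic.getD i 0 == 0 then
        dic.insert i (lst.foldl (fun count j =>
          if PySem.Str.startswith j i then count + 1 else count) 0)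
      else dic) (PySem.Dict.empty : PySem.Dict String Int) with hdA
  set dB := lst.foldl (fun dic j =>
      (PySem.List.pyRange 0 (PySem.Str.len j + 1) 1).foldl (fun d t =>
        let p := PySem.Str.slice j none (some t)
        if d.contains p then d.modify p 0 (· + 1) else d) dic) dB0 with hdB
  have hkeq : dA.keys = dB.keys := by rw [hAk, hBk, hB0k]
  show dA.items = dB.items
  rw [pv_items_eq_keys_map dA hAnd, pv_items_eq_keys_map dB (hBk ▸ hB0nd), ← hkeq]
  apply List.map_congr_left
  intro k hk
  have hcA : dA.contains k = true := (PySem.Dict.contains_iff_mem_keys dA k).mpr hk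
  have hmB : k ∈ dB0.keys := by rw [hB0k, ← hAk]; exact hk
  have hcB0 : dB0.contains k = true := (PySem.Dict.contains_iff_mem_keys dB0 k).mpr hmB
  rw [hAv k hcA, hBv k, hB0v k, if_pos hcB0]
  simp
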